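-- pv_equiv track=rewrite | github.com/danishmustafa86/Meta-Hacker-Cup- | Meta Hacker Cup 2024 Round 1/Prime Subtractorization/pro.py | count_subtractorizations
-- ===== SOURCE A (Python) =====
-- def sieve_of_eratosthenes(n):
--     """Generate a list of prime numbers up to n."""
--     primes = [True] * (n + 1)
--     primes[0] = primes[1] = False
--     for i in range(2, int(n**0.5) + 1):
--         if primes[i]:
--             for j in range(i*i, n + 1, i):
--                 primes[j] = False
--     return [i for i in range(2, n + 1) if primes[i]]
--
-- def count_subtractorizations(n):
--     """Count the number of subtractorizations for a given n."""
--     primes = sieve_of_eratosthenes(n * n)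
--     prime_set = set(primes)
--     subtractorizations = set()
--
--     for i, p1 in enumerate(primes):
--         if p1 > n:
--             break
--         for j in range(i, len(primes)):
--             p2 = primes[j]
--             if p2 > n:
--                 break
--             diff = abs(p2 - p1)
--             if diff in prime_set:
--                 subtractorizations.add(diff)
--
--     return len(subtractorizations)
-- ===== SOURCE B (Python) =====
-- def _sieve(limit):
--     """Standard sieve of Eratosthenes: primes up to limit."""
--     prime = [True] * (limit + 1)
--     prime[0] = prime[1] = False
--     for i in range(2, int(limit**0.5) + 1):
--         if prime[i]:
--             for j in range(i * i, limit + 1, i):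
--                 prime[j] = False
--     return [i for i in range(2, limit + 1) if prime[i]]
--
--
-- def count_subtractorizations(n):
--     """Count the number of subtractorizations for a given n.
--
--     A prime difference d = q - p of two primes p <= q <= n is either 2 (a twin
--     prime gap) or odd, and an odd prime difference forces p = 2, so d counts
--     iff d + 2 = q is also prime.  Twin pairs are adjacent in the sorted prime
--     list, so one gap scan counts the odd differences, and the difference 2
--     occurs iff at least one twin pair exists.
--     """
--     if n < 2:
--         return 0
--     primes = _sieve(n)
--     t = 0
--     prev = None
--     for p in primes:
--         if prev is not None and p - prev == 2:
--             t += 1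
--         prev = p
--     return t + 1 if t else t
-- ===== Notes on version B (the rewrite author's own statement) =====
-- stated objective: faster
-- what changed: B sieves primes only up to n (A sieves up to n*n) and uses the fact that an odd prime difference q - p of two primes forces p = 2, so the distinct prime differences are exactly the twin gaps: one scan counting adjacent prime gaps equal to 2 (plus 1 for the difference 2 when a twin pair exists) replaces A's loop over all prime pairs with set lookups.
-- outside the precondition, e.g. on count_subtractorizations(0): A raises IndexError, B returns 0
import Mathlib
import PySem

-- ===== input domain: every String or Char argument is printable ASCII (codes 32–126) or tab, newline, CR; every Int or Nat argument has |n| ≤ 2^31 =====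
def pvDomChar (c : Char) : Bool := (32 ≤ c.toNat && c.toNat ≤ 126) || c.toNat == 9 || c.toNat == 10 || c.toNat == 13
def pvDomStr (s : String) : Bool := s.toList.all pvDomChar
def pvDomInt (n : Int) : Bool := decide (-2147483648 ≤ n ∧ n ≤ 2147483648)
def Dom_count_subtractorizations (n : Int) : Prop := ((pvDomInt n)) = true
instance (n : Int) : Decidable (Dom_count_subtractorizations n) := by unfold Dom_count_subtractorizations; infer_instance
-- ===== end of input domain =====

-- B sieves only to n (A sieves to n*n): an odd prime difference q - p of primes forces p = 2,
-- so the distinct prime differences are the twin gaps (adjacent in the sorted prime list) plus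
-- the difference 2 when a twin pair exists; one gap scan replaces A's loop over all prime pairs;
-- objective: faster.

-- ===== PORT A =====
-- Shared sieve helper: Source A's `sieve_of_eratosthenes` and Source B's `_sieve` are the identical code,
-- ported once.  `int(limit**0.5)` is ported as Int.sqrt, exact on every input the programs run on
-- within Dom (for A the argument n*n is a perfect square, for B the argument n is ≤ 2^31 < 2^52,
-- where the float sqrt rounds to the integer square root).
-- The Python boolean buffer is ported as Array Bool (exact: every index below is a
-- provably nonnegative in-range Int, so `.toNat` + setIfInBounds/getD agree with Python's
-- list indexing wherever the Python does not raise).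
def pvSieveInit (m : Int) : Array Bool :=
  -- primes = [True] * (m + 1); primes[0] = primes[1] = False  (IndexError when m < 1: outside Pre_)
  ((Array.replicate (m + 1).toNat true).setIfInBounds 0 false).setIfInBounds 1 false

def pvSieveMark (m i : Int) (arr : Array Bool) : Array Bool :=
  -- for j in range(i*i, m + 1, i): primes[j] = False   (j ≥ i*i ≥ 0)
  (PySem.List.pyRange (i * i) (m + 1) i).foldl (fun a j => a.setIfInBounds j.toNat false) arr

def pvSieveStep (m : Int) (arr : Array Bool) (i : Int) : Array Bool :=
  if arr.getD i.toNat false then pvSieveMark m i arr else arr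

def pvSievePrimes (m : Int) : List Int :=
  -- for i in range(2, int(m**0.5) + 1): …  then  [i for i in range(2, m + 1) if primes[i]]
  let arr := (PySem.List.pyRange 2 (Int.sqrt m + 1) 1).foldl (pvSieveStep m) (pvSieveInit m)
  (PySem.List.pyRange 2 (m + 1) 1).filter (fun i => arr.getD i.toNat false)

-- inner loop: for j in range(i, len(primes)): …  with break on p2 > n  (iterates the suffix from i)
def pvInnerA (pset : Std.HashSet Int) (n p1 : Int) : List Int → PySem.Set Int → PySem.Set Int
  | [], acc => acc
  | p2 :: rest, acc =>
    if p2 > n then acc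
    else
      let diff := |p2 - p1|
      pvInnerA pset n p1 rest (if pset.contains diff then PySem.Set.add acc diff else acc)

-- outer loop: for i, p1 in enumerate(primes): … with break on p1 > n
def pvOuterA (pset : Std.HashSet Int) (n : Int) : List Int → PySem.Set Int → PySem.Set Int
  | [], acc => acc
  | p1 :: rest, acc =>
    if p1 > n then acc
    else pvOuterA pset n rest (pvInnerA pset n p1 (p1 :: rest) acc)

def count_subtractorizations (n : Int) : Int :=
  let primes := pvSievePrimes (n * n)
  -- prime_set = set(primes) is consumed only through membership tests `diff in prime_set`,
  -- so it is ported as a hash set (exact: `x in set(xs)` ⟺ `x ∈ xs`, Std.HashSet.contains_ofList)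
  let prime_set := Std.HashSet.ofList primes
  let subs := pvOuterA prime_set n primes PySem.Set.empty
  PySem.Set.len subs

-- ===== PORT B =====
-- loop state (prev, t) of B's gap scan; one step of 'if prev is not None and p - prev == 2: t += 1; prev = p'
def pvGapStep (st : Option Int × Int) (p : Int) : Option Int × Int :=
  (some p, match st.1 with
    | some q => if p - q == 2 then st.2 + 1 else st.2
    | none => st.2)

def count_subtractorizations_alt (n : Int) : Int :=
  if n < 2 then 0
  else
    let primes := pvSievePrimes n
    let t : Int := (primes.foldl pvGapStep (none, 0)).2
    -- return t + 1 if t else t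
    if t ≠ 0 then t + 1 else t

-- ===== PRECONDITION & SPEC =====
-- Pre_ excludes only n = 0: there A sieves to n*n = 0, builds a 1-element array and
-- 'primes[0] = primes[1] = False' raises IndexError.
def Pre_count_subtractorizations (n : Int) : Prop := n ≠ 0
instance (n : Int) : Decidable (Pre_count_subtractorizations n) := by
  unfold Pre_count_subtractorizations; infer_instance
def pvWitness_count_subtractorizations : Int := 10

def Spec_count_subtractorizations (n : Int) (out : Int) : Prop := out = count_subtractorizations_alt n
instance (n : Int) (out : Int) : Decidable (Spec_count_subtractorizations n out) := by
  unfold Spec_count_subtractorizations; infer_instance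

-- ===== CLAIM (what is proved, stated in full; the proofs are below) =====
def Claim_equal_count_subtractorizations : Prop :=
  ∀ (n : Int), Dom_count_subtractorizations n → Pre_count_subtractorizations n →
    Spec_count_subtractorizations n (count_subtractorizations n)

-- ===== LEMMAS AND PROOFS =====

lemma pvGetD_set_false (arr : Array Bool) (jn k : Nat) :
    (arr.setIfInBounds jn false).getD k false = if k = jn then false else arr.getD k false := by
  simp only [Array.getD_eq_getD_getElem?, Array.getElem?_setIfInBounds]
  split_ifs <;> simp_all

lemma pvFoldl_setD_getD (L : List Int) (hL : ∀ j ∈ L, 0 ≤ j) (arr : Array Bool) (k : Nat) :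
    (L.foldl (fun a j => a.setIfInBounds j.toNat false) arr).getD k false
      = if (k : Int) ∈ L then false else arr.getD k false := by
  induction L generalizing arr with
  | nil => simp
  | cons j t ih =>
    have hj : 0 ≤ j := hL j (List.mem_cons_self ..)
    simp only [List.foldl_cons]
    rw [ih (fun x hx => hL x (List.mem_cons_of_mem _ hx))]
    rw [pvGetD_set_false]
    have hiff : ((k : Int) = j) ↔ k = j.toNat := by omega
    by_cases hk : (k : Int) ∈ t <;> by_cases hkj : (k : Int) = j <;>
      simp_all [List.mem_cons]

lemma pvIntSqrt_le (m : Int) (hm : 0 ≤ m) : Int.sqrt m ≤ m := by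
  show ((m.toNat.sqrt : Int)) ≤ m
  calc ((m.toNat.sqrt : Int)) ≤ (m.toNat : Int) := by exact_mod_cast Nat.sqrt_le_self _
    _ = m := Int.toNat_of_nonneg hm

lemma pvPrime_iff_no_lt_factor (j : Nat) (hj : 2 ≤ j) :
    Nat.Prime j ↔ ∀ p : Nat, Nat.Prime p → p < j → p ∣ j → ¬ (p * p ≤ j) := by
  constructor
  · intro hpr p hp hlt hdvd _
    exact absurd ((Nat.prime_dvd_prime_iff_eq hp hpr).mp hdvd) (Nat.ne_of_lt hlt)
  · intro h
    by_contra hnp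
    have hpos : 0 < j := by omega
    have hp := Nat.minFac_prime (by omega : j ≠ 1)
    have hsq : j.minFac * j.minFac ≤ j := by
      have := Nat.minFac_sq_le_self hpos hnp
      nlinarith [this]
    have h2p : 2 ≤ j.minFac := hp.two_le
    have hlt : j.minFac < j := by nlinarith
    exact h j.minFac hp hlt (Nat.minFac_dvd j) hsq

lemma pvPrime_iff_no_sqrt_factor (m : Int) (hm : 1 ≤ m) (j : Nat) (h2 : 2 ≤ j)
    (hjm : (j : Int) ≤ m) :
    (∀ p : Nat, Nat.Prime p → (p : Int) < Int.sqrt m + 1 → p ∣ j → ¬ ((p : Int) * p ≤ (j : Int)))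
      ↔ Nat.Prime j := by
  constructor
  · intro h
    by_contra hnp
    have hpos : 0 < j := by omega
    have hp := Nat.minFac_prime (by omega : j ≠ 1)
    have hsq : j.minFac * j.minFac ≤ j := by
      have := Nat.minFac_sq_le_self hpos hnp
      nlinarith [this]
    have hbound : (j.minFac : Int) < Int.sqrt m + 1 := by
      have hmn : j.minFac * j.minFac ≤ m.toNat := by omega
      have : j.minFac ≤ m.toNat.sqrt := Nat.le_sqrt.mpr hmn
      show (j.minFac : Int) < (m.toNat.sqrt : Int) + 1
      exact_mod_cast Nat.lt_succ_of_le this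
    exact h j.minFac hp hbound (Nat.minFac_dvd j) (by exact_mod_cast hsq)
  · intro hpr p hp _ hdvd hle
    have : p = j := (Nat.prime_dvd_prime_iff_eq hp hpr).mp hdvd
    subst this
    have : p * p ≤ p := by exact_mod_cast hle
    nlinarith [hp.two_le]


lemma pvSieveMark_getD (m i : Int) (hi : 2 ≤ i) (arr : Array Bool) (k : Nat) :
    (pvSieveMark m i arr).getD k false
      = if i ∣ (k : Int) ∧ i * i ≤ (k : Int) ∧ (k : Int) ≤ m then false
        else arr.getD k false := by
  unfold pvSieveMark
  rw [pvFoldl_setD_getD _ (fun j hj => by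
    have := (PySem.List.mem_pyRange_iff_of_pos (by omega : (0:Int) < i) j).mp hj
    nlinarith [this.1])]
  have hiff : ((k : Int) ∈ PySem.List.pyRange (i * i) (m + 1) i)
      ↔ (i ∣ (k : Int) ∧ i * i ≤ (k : Int) ∧ (k : Int) ≤ m) := by
    rw [PySem.List.mem_pyRange_iff_of_pos (by omega : (0:Int) < i)]
    constructor
    · rintro ⟨h1, h2, h3⟩
      refine ⟨?_, h1, by omega⟩
      have : i ∣ (k : Int) - i * i + i * i := dvd_add h3 (Dvd.intro i rfl)
      simpa using this
    · rintro ⟨h1, h2, h3⟩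
      exact ⟨h2, by omega, dvd_sub h1 (Dvd.intro i rfl)⟩
  by_cases h : i ∣ (k : Int) ∧ i * i ≤ (k : Int) ∧ (k : Int) ≤ m <;> simp [hiff, h]

lemma pvSieveInit_getD (m : Int) (hm : 1 ≤ m) (k : Nat) (hk : (k : Int) ≤ m) :
    (pvSieveInit m).getD k false = decide (2 ≤ k) := by
  unfold pvSieveInit
  rw [pvGetD_set_false, pvGetD_set_false]
  have hlen : k < (m + 1).toNat := by omega
  rcases Nat.lt_or_ge k 2 with h | h
  · interval_cases k <;> simp
  · rw [if_neg (by omega), if_neg (by omega)]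
    simp only [Array.getD_eq_getD_getElem?, Array.getElem?_replicate, if_pos hlen]
    simp [h]


lemma pvSieveLoop_inv (m : Int) (hm : 1 ≤ m) (c : Nat) :
    ∀ (_ : 2 + (c : Int) ≤ Int.sqrt m + 1) (k : Nat) (_ : (k : Int) ≤ m),
    ((((PySem.List.pyRange 2 (2 + (c : Int)) 1).foldl (pvSieveStep m) (pvSieveInit m)).getD k false)
        = true)
      ↔ (2 ≤ k ∧ ∀ p : Nat, Nat.Prime p → (p : Int) < 2 + (c : Int) → p ∣ k →
            ¬ ((p : Int) * p ≤ (k : Int))) := by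
  induction c with
  | zero =>
    intro _ k hk
    rw [show ((2:Int) + ((0:Nat):Int)) = 2 by norm_num,
      PySem.List.pyRange_one_eq_nil (le_refl 2), List.foldl_nil,
      pvSieveInit_getD m hm k hk]
    simp only [decide_eq_true_eq]
    constructor
    · intro h
      refine ⟨h, fun p hp hlt _ _ => ?_⟩
      have := hp.two_le
      norm_num at hlt
      omega
    · exact fun h => h.1
  | succ c ih =>
    intro hc k hk
    have hsqle : Int.sqrt m ≤ m := pvIntSqrt_le m (by omega)
    have hc' : 2 + (c : Int) ≤ Int.sqrt m + 1 := by push_cast at hc ⊢; omega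
    have htm : 2 + (c : Int) ≤ m := by push_cast at hc; omega
    have hcast : ((2:Int) + ((c+1 : Nat) : Int)) = (2 + (c : Int)) + 1 := by push_cast; ring
    rw [hcast, PySem.List.pyRange_one_succ_right (by omega : (2:Int) ≤ 2 + (c:Int)),
      List.foldl_append, List.foldl_cons, List.foldl_nil]
    set arrT := ((PySem.List.pyRange 2 (2 + (c : Int)) 1).foldl (pvSieveStep m) (pvSieveInit m))
      with hArrT
    set tn := ((2 : Int) + (c : Int)).toNat with htn_def
    have htn : ((tn : Nat) : Int) = 2 + (c : Int) := Int.toNat_of_nonneg (by omega)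
    have hval : (arrT.getD tn false = true) ↔ Nat.Prime tn := by
      rw [ih hc' tn (by omega)]
      rw [pvPrime_iff_no_lt_factor tn (by omega)]
      constructor
      · rintro ⟨-, hall⟩ p hp hlt hdvd hle
        exact hall p hp (by omega) hdvd (by exact_mod_cast hle)
      · intro hall
        refine ⟨by omega, fun p hp hlt hdvd hle => ?_⟩
        exact hall p hp (by omega) hdvd (by exact_mod_cast hle)
    unfold pvSieveStep
    by_cases hp : Nat.Prime tn
    · rw [if_pos (hval.mpr hp), pvSieveMark_getD m _ (by omega)]
      by_cases hmark : (2 + (c:Int)) ∣ (k : Int) ∧ (2 + (c:Int)) * (2 + (c:Int)) ≤ (k : Int)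
        ∧ (k : Int) ≤ m
      · rw [if_pos hmark]
        simp only [Bool.false_eq_true, false_iff]
        rintro ⟨-, hall⟩
        refine hall tn hp (by omega) ?_ ?_
        · exact_mod_cast htn ▸ hmark.1
        · push_cast [htn]; exact hmark.2.1
      · rw [if_neg hmark, ih hc' k hk]
        constructor
        · rintro ⟨h2k, hall⟩
          refine ⟨h2k, fun p hp' hlt hdvd hle => ?_⟩
          by_cases hplt : (p : Int) < 2 + (c : Int)
          · exact hall p hp' hplt hdvd hle
          · have hpe : (p : Int) = 2 + (c : Int) := by omega
            exact hmark ⟨hpe ▸ Int.natCast_dvd_natCast.mpr hdvd, by rw [← hpe]; exact_mod_cast hle, hk⟩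
        · rintro ⟨h2k, hall⟩
          exact ⟨h2k, fun p hp' hlt hdvd hle => hall p hp' (by omega) hdvd hle⟩
    · have hb : arrT.getD tn false = false := by
        cases hbv : arrT.getD tn false
        · rfl
        · exact absurd (hval.mp hbv) hp
      rw [hb, if_neg (by simp), ih hc' k hk]
      constructor
      · rintro ⟨h2k, hall⟩
        refine ⟨h2k, fun p hp' hlt hdvd hle => ?_⟩
        by_cases hplt : (p : Int) < 2 + (c : Int)
        · exact hall p hp' hplt hdvd hle
        · have hpe : p = tn := by omega
          exact hp (hpe ▸ hp')
      · rintro ⟨h2k, hall⟩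
        exact ⟨h2k, fun p hp' hlt hdvd hle => hall p hp' (by omega) hdvd hle⟩


lemma pvSievePrimes_eq (m : Int) (hm : 1 ≤ m) :
    pvSievePrimes m
      = (PySem.List.pyRange 2 (m + 1) 1).filter (fun k => decide (Nat.Prime k.toNat)) := by
  unfold pvSievePrimes
  refine List.filter_congr (fun k hk => ?_)
  rw [PySem.List.mem_pyRange_one] at hk
  have hsq1 : 1 ≤ Int.sqrt m := by
    show (1 : Int) ≤ (m.toNat.sqrt : Int)
    exact_mod_cast Nat.le_sqrt.mpr (by omega)
  have hcbound : 2 + ((Int.sqrt m - 1).toNat : Int) = Int.sqrt m + 1 := by omega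
  have hinv := pvSieveLoop_inv m hm (Int.sqrt m - 1).toNat (by omega) k.toNat (by omega)
  rw [hcbound] at hinv
  have hiff : (∀ p : Nat, Nat.Prime p → (p : Int) < Int.sqrt m + 1 → p ∣ k.toNat →
      ¬ ((p : Int) * p ≤ (k.toNat : Int))) ↔ Nat.Prime k.toNat :=
    pvPrime_iff_no_sqrt_factor m hm k.toNat (by omega) (by omega)
  cases hbv : (((PySem.List.pyRange 2 (Int.sqrt m + 1) 1).foldl (pvSieveStep m)
      (pvSieveInit m)).getD k.toNat false)
  · rw [hbv] at hinv
    simp only [Bool.false_eq_true, false_iff] at hinv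
    have hnp : ¬ Nat.Prime k.toNat := fun hp => hinv ⟨by omega, hiff.mpr hp⟩
    exact (decide_eq_false hnp).symm
  · rw [hbv] at hinv
    have hp : Nat.Prime k.toNat := hiff.mp (hinv.mp rfl).2
    exact (decide_eq_true hp).symm

lemma pvMem_pvSievePrimes_ge2 (m x : Int) (hx : x ∈ pvSievePrimes m) : 2 ≤ x := by
  unfold pvSievePrimes at hx
  have := List.mem_filter.mp hx
  exact (PySem.List.mem_pyRange_one.mp this.1).1


lemma pvInnerA_stop (pset : Std.HashSet Int) (n p1 : Int) (v : List Int) (acc : PySem.Set Int)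
    (hv : ∀ x ∈ v, n < x) : pvInnerA pset n p1 v acc = acc := by
  cases v with
  | nil => rfl
  | cons h t => simp [pvInnerA, hv h (List.mem_cons_self ..)]

lemma pvOuterA_stop (pset : Std.HashSet Int) (n : Int) (v : List Int) (acc : PySem.Set Int)
    (hv : ∀ x ∈ v, n < x) : pvOuterA pset n v acc = acc := by
  cases v with
  | nil => rfl
  | cons h t => simp [pvOuterA, hv h (List.mem_cons_self ..)]

lemma pvInnerA_nodup (pset : Std.HashSet Int) (n p1 : Int) (v : List Int) :
    ∀ (acc : PySem.Set Int), acc.Nodup → (pvInnerA pset n p1 v acc).Nodup := by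
  induction v with
  | nil => intro acc h; exact h
  | cons p2 t ih =>
    intro acc h
    by_cases hb : p2 > n
    · simpa [pvInnerA, hb] using h
    · simp only [pvInnerA, if_neg hb]
      refine ih _ ?_
      split
      · exact PySem.Set.nodup_add _ _ h
      · exact h

lemma pvOuterA_nodup (pset : Std.HashSet Int) (n : Int) (v : List Int) :
    ∀ (acc : PySem.Set Int), acc.Nodup → (pvOuterA pset n v acc).Nodup := by
  induction v with
  | nil => intro acc h; exact h
  | cons p1 t ih =>
    intro acc h
    by_cases hb : p1 > n
    · simpa [pvOuterA, hb] using h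
    · simp only [pvOuterA, if_neg hb]
      exact ih _ (pvInnerA_nodup pset n p1 _ acc h)

lemma pvInnerA_mem (pset : Std.HashSet Int) (n p1 : Int) (u v : List Int)
    (hv : ∀ x ∈ v, n < x) :
    ∀ (acc : PySem.Set Int) (d : Int), (∀ x ∈ u, x ≤ n) →
    (d ∈ pvInnerA pset n p1 (u ++ v) acc
      ↔ d ∈ acc ∨ ∃ p2 ∈ u, d = |p2 - p1| ∧ pset.contains |p2 - p1| = true) := by
  induction u with
  | nil =>
    intro acc d _
    simp [pvInnerA_stop pset n p1 v acc hv]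
  | cons p2 t ih =>
    intro acc d hu
    have h2 : ¬ p2 > n := not_lt.mpr (hu p2 (List.mem_cons_self ..))
    simp only [List.cons_append, pvInnerA, if_neg h2]
    rw [ih _ d (fun x hx => hu x (List.mem_cons_of_mem _ hx))]
    by_cases hc : pset.contains |p2 - p1| = true
    · rw [if_pos hc]
      simp only [PySem.Set.mem_add, List.mem_cons]
      constructor
      · rintro ((h | h) | ⟨q, hq, hd, hin⟩)
        · exact Or.inl h
        · exact Or.inr ⟨p2, Or.inl rfl, h, hc⟩
        · exact Or.inr ⟨q, Or.inr hq, hd, hin⟩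
      · rintro (h | ⟨q, (rfl | hq), hd, hin⟩)
        · exact Or.inl (Or.inl h)
        · exact Or.inl (Or.inr hd)
        · exact Or.inr ⟨q, hq, hd, hin⟩
    · rw [if_neg hc]
      simp only [List.mem_cons]
      constructor
      · rintro (h | ⟨q, hq, hd, hin⟩)
        · exact Or.inl h
        · exact Or.inr ⟨q, Or.inr hq, hd, hin⟩
      · rintro (h | ⟨q, (rfl | hq), hd, hin⟩)
        · exact Or.inl h
        · exact absurd hin hc
        · exact Or.inr ⟨q, hq, hd, hin⟩

lemma pvOuterA_mem (pset : Std.HashSet Int) (n : Int) (v : List Int) (hv : ∀ x ∈ v, n < x)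
    (u : List Int) :
    ∀ (acc : PySem.Set Int) (d : Int), u.Pairwise (· < ·) → (∀ x ∈ u, x ≤ n) →
    (d ∈ pvOuterA pset n (u ++ v) acc
      ↔ d ∈ acc ∨ ∃ p1 ∈ u, ∃ p2 ∈ u, p1 ≤ p2 ∧ d = p2 - p1
          ∧ pset.contains (p2 - p1) = true) := by
  induction u with
  | nil =>
    intro acc d _ _
    simp [pvOuterA_stop pset n v acc hv]
  | cons p1 t ih =>
    intro acc d hpw hu
    have h1 : ¬ p1 > n := not_lt.mpr (hu p1 (List.mem_cons_self ..))
    have hlt : ∀ x ∈ t, p1 < x := fun x hx => (List.pairwise_cons.mp hpw).1 x hx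
    simp only [List.cons_append, pvOuterA, if_neg h1]
    rw [ih _ d (List.pairwise_cons.mp hpw).2 (fun x hx => hu x (List.mem_cons_of_mem _ hx))]
    rw [show p1 :: (t ++ v) = (p1 :: t) ++ v from rfl]
    rw [pvInnerA_mem pset n p1 (p1 :: t) v hv acc d hu]
    have habs : ∀ p2 ∈ p1 :: t, |p2 - p1| = p2 - p1 := by
      intro p2 hp2
      rcases List.mem_cons.mp hp2 with rfl | h
      · simp
      · exact abs_of_nonneg (by have := hlt p2 h; omega)
    constructor
    · rintro ((h | ⟨q, hq, hd, hin⟩) | ⟨a, ha, b, hb, hab, hd, hin⟩)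
      · exact Or.inl h
      · rw [habs q hq] at hd hin
        refine Or.inr ⟨p1, List.mem_cons_self .., q, hq, ?_, hd, hin⟩
        rcases List.mem_cons.mp hq with rfl | hq'
        · omega
        · exact le_of_lt (hlt q hq')
      · exact Or.inr ⟨a, List.mem_cons_of_mem _ ha, b, List.mem_cons_of_mem _ hb, hab, hd, hin⟩
    · rintro (h | ⟨a, ha, b, hb, hab, hd, hin⟩)
      · exact Or.inl (Or.inl h)
      · rcases List.mem_cons.mp ha with rfl | ha'
        · refine Or.inl (Or.inr ⟨b, hb, ?_, ?_⟩)
          · rw [habs b hb]; exact hd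
          · rw [habs b hb]; exact hin
        · have hb' : b ∈ t := by
            rcases List.mem_cons.mp hb with rfl | hb'
            · exact absurd (lt_of_lt_of_le (hlt a ha') hab) (lt_irrefl b)
            · exact hb'
          exact Or.inr ⟨a, ha', b, hb', hab, hd, hin⟩

lemma pvOddDiff (p1 p2 d : Int) (h1 : 2 ≤ p1) (h2 : 2 ≤ p2) (hd : d = p2 - p1)
    (hdp : Nat.Prime d.toNat) (hd2 : 2 ≤ d) (hne : d ≠ 2)
    (hp1 : Nat.Prime p1.toNat) (hp2 : Nat.Prime p2.toNat) : p1 = 2 := by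
  have he : d.toNat ≠ 2 := by omega
  have hodd : d.toNat % 2 = 1 := Nat.odd_iff.mp (hdp.odd_of_ne_two he)
  have hb : p2.toNat = p1.toNat + d.toNat := by omega
  by_cases ha : p1.toNat % 2 = 0
  · have : p1.toNat = 2 := (Nat.Prime.even_iff hp1).mp (Nat.even_iff.mpr ha)
    omega
  · have hbe : p2.toNat % 2 = 0 := by omega
    have : p2.toNat = 2 := (Nat.Prime.even_iff hp2).mp (Nat.even_iff.mpr hbe)
    omega

lemma pvZipCount (L : List Int) (hpw : L.Pairwise (· < ·))
    (hpr : ∀ x ∈ L, 2 ≤ x ∧ Nat.Prime x.toNat) :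
    (L.zip L.tail).countP (fun pq => pq.2 - pq.1 == 2)
      = (L.filter (fun p => decide (p + 2 ∈ L))).length := by
  induction L with
  | nil => simp
  | cons a t ih =>
    cases t with
    | nil =>
      simp only [List.tail_cons, List.zip_nil_right, List.countP_nil, List.filter,
        List.mem_singleton]
      have : ¬ (a + 2 = a) := by omega
      simp [this]
    | cons b r =>
      have hab : a < b := (List.pairwise_cons.mp hpw).1 b (List.mem_cons_self ..)
      have hbr : ∀ x ∈ r, b < x :=
        fun x hx => (List.pairwise_cons.mp (List.pairwise_cons.mp hpw).2).1 x hx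
      have htail_pw := (List.pairwise_cons.mp hpw).2
      have htail_pr : ∀ x ∈ b :: r, 2 ≤ x ∧ Nat.Prime x.toNat :=
        fun x hx => hpr x (List.mem_cons_of_mem _ hx)
      have hmemiff : (a + 2 ∈ a :: b :: r) ↔ b = a + 2 := by
        constructor
        · intro hmem
          rcases List.mem_cons.mp hmem with h | hmem2
          · omega
          · rcases List.mem_cons.mp hmem2 with h | hmem3
            · omega
            · -- a + 2 ∈ r, so b < a + 2, so b = a + 1: a and a+1 both prime
              have hblt : b < a + 2 := hbr _ hmem3
              have hba1 : b = a + 1 := by omega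
              have hpa := hpr a (List.mem_cons_self ..)
              have hpb := hpr b (List.mem_cons_of_mem _ (List.mem_cons_self ..))
              -- one of a, a+1 is even prime hence = 2, so a = 2, a+2 = 4 ∈ r: 4 prime, absurd
              have ha2 : a = 2 := by
                by_cases ha : a.toNat % 2 = 0
                · have : a.toNat = 2 := (Nat.Prime.even_iff hpa.2).mp (Nat.even_iff.mpr ha)
                  omega
                · have hb0 : b.toNat % 2 = 0 := by omega
                  have : b.toNat = 2 := (Nat.Prime.even_iff hpb.2).mp (Nat.even_iff.mpr hb0)
                  omega
              have h4 := hpr (a + 2) (List.mem_cons_of_mem _ (List.mem_cons_of_mem _ hmem3))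
              rw [ha2] at h4
              exact absurd h4.2 (by decide)
        · intro hb
          exact List.mem_cons_of_mem _ (List.mem_cons.mpr (Or.inl hb.symm))
      have hswitch : ∀ p ∈ b :: r, (decide (p + 2 ∈ a :: b :: r) : Bool)
          = decide (p + 2 ∈ b :: r) := by
        intro p hp
        have hpa : a < p := (List.pairwise_cons.mp hpw).1 p hp
        have : (p + 2 ∈ a :: b :: r) ↔ (p + 2 ∈ b :: r) := by
          rw [List.mem_cons]
          constructor
          · rintro (h | h)
            · omega
            · exact h
          · exact Or.inr
        simp [this]
      have hzip : (a :: b :: r).zip (a :: b :: r).tail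
          = (a, b) :: ((b :: r).zip r) := rfl
      rw [hzip, List.countP_cons]
      have hfil : (a :: b :: r).filter (fun p => decide (p + 2 ∈ a :: b :: r))
          = (if b = a + 2 then [a] else [])
            ++ (b :: r).filter (fun p => decide (p + 2 ∈ b :: r)) := by
        rw [List.filter_cons]
        rw [List.filter_congr hswitch]
        by_cases hb2 : b = a + 2
        · rw [if_pos (by simp [hb2]), if_pos hb2]
          rfl
        · rw [if_neg (by simp [hmemiff, hb2]), if_neg hb2]
          rfl
      rw [hfil, List.length_append]
      have ih' := ih htail_pw htail_pr
      rw [List.tail_cons] at ih'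
      rw [ih']
      by_cases hb2 : b = a + 2
      · have : (((a, b).2 - (a, b).1 == 2) : Bool) = true := by simp [hb2]
        rw [if_pos hb2]
        simp [this]
        omega
      · have : (((a, b).2 - (a, b).1 == 2) : Bool) = false := by
          simp
          omega
        rw [if_neg hb2]
        simp [this]

lemma pvFoldB_some (L : List Int) : ∀ (q t : Int),
    (L.foldl pvGapStep (some q, t)).2
      = t + (((q :: L).zip L).countP (fun pq => pq.2 - pq.1 == 2) : Int) := by
  induction L with
  | nil => simp
  | cons p rest ih =>
    intro q t
    have hstep : pvGapStep (some q, t) p = (some p, if p - q == 2 then t + 1 else t) := rfl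
    rw [List.foldl_cons, hstep]
    rw [ih p _]
    have hzip : (q :: p :: rest).zip (p :: rest) = (q, p) :: ((p :: rest).zip rest) := rfl
    rw [hzip, List.countP_cons]
    by_cases h : ((p : Int) - q == 2) = true
    · simp [h]
      omega
    · rw [if_neg h]
      simp only [h]
      simp
  -- note: countP_cons adds at the end; reorder with omega

lemma pvGapCount (L : List Int) :
    (L.foldl pvGapStep (none, 0)).2
      = ((L.zip L.tail).countP (fun pq => pq.2 - pq.1 == 2) : Int) := by
  cases L with
  | nil => simp
  | cons p rest =>
    have hstep : pvGapStep (none, 0) p = (some p, 0) := rfl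
    rw [List.foldl_cons, hstep, pvFoldB_some]
    simp

lemma pvMain (n : Int) :
    count_subtractorizations n = count_subtractorizations_alt n := by
  by_cases h2 : n < 2
  · have hB : count_subtractorizations_alt n = 0 := by
      simp [count_subtractorizations_alt, h2]
    have hA : count_subtractorizations n
        = PySem.Set.len (pvOuterA (Std.HashSet.ofList (pvSievePrimes (n*n))) n
            (pvSievePrimes (n*n)) PySem.Set.empty) := rfl
    rw [hB, hA, pvOuterA_stop _ n _ _
      (fun x hx => lt_of_lt_of_le h2 (pvMem_pvSievePrimes_ge2 _ x hx))]
    rfl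
  · rw [not_lt] at h2
    have hn1 : (1:Int) ≤ n := by omega
    have hnn : (1:Int) ≤ n * n := by nlinarith
    have hnlenn : n ≤ n * n := by nlinarith
    have hPB : pvSievePrimes n
        = (PySem.List.pyRange 2 (n+1) 1).filter (fun k => decide (Nat.Prime k.toNat)) :=
      pvSievePrimes_eq n hn1
    set PB := (PySem.List.pyRange 2 (n+1) 1).filter (fun k => decide (Nat.Prime k.toNat))
      with hPBdef
    set R := (PySem.List.pyRange (n+1) (n*n+1) 1).filter (fun k => decide (Nat.Prime k.toNat))
      with hRdef
    have hsplit : pvSievePrimes (n*n) = PB ++ R := by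
      rw [pvSievePrimes_eq (n*n) hnn,
        PySem.List.pyRange_one_append 2 (n+1) (n*n+1) (by omega) (by omega), List.filter_append]
    have hmemPB : ∀ d, d ∈ PB ↔ 2 ≤ d ∧ d < n + 1 ∧ Nat.Prime d.toNat := by
      intro d
      rw [hPBdef, List.mem_filter, PySem.List.mem_pyRange_one]
      simp [and_assoc]
    have hmemPA : ∀ d, d ∈ PB ++ R ↔ 2 ≤ d ∧ d < n*n + 1 ∧ Nat.Prime d.toNat := by
      intro d
      rw [← hsplit, pvSievePrimes_eq (n*n) hnn, List.mem_filter, PySem.List.mem_pyRange_one]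
      simp [and_assoc]
    have hPBle : ∀ x ∈ PB, x ≤ n := fun x hx => by have := (hmemPB x).mp hx; omega
    have hRgt : ∀ x ∈ R, n < x := by
      intro x hx
      rw [hRdef, List.mem_filter] at hx
      have := PySem.List.mem_pyRange_one.mp hx.1
      omega
    have hPBpw : PB.Pairwise (· < ·) :=
      (PySem.List.pairwise_lt_pyRange_one 2 (n+1)).filter _
    have hPBnd : PB.Nodup := hPBpw.imp (fun h => ne_of_lt h)
    have hcont : ∀ d, ((Std.HashSet.ofList (PB ++ R)).contains d = true) ↔ d ∈ PB ++ R := by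
      intro d
      rw [Std.HashSet.contains_ofList]
      exact List.contains_iff_mem
    -- A's value
    have hA : count_subtractorizations n
        = PySem.Set.len (pvOuterA (Std.HashSet.ofList (PB ++ R)) n (PB ++ R)
            PySem.Set.empty) := by
      show PySem.Set.len (pvOuterA (Std.HashSet.ofList (pvSievePrimes (n*n))) n
        (pvSievePrimes (n*n)) PySem.Set.empty) = _
      rw [hsplit]
    set S := pvOuterA (Std.HashSet.ofList (PB ++ R)) n (PB ++ R) PySem.Set.empty with hS
    have hSmem : ∀ d, d ∈ S ↔ ∃ p1 ∈ PB, ∃ p2 ∈ PB, p1 ≤ p2 ∧ d = p2 - p1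
        ∧ p2 - p1 ∈ PB ++ R := by
      intro d
      rw [hS, pvOuterA_mem _ n R hRgt PB _ d hPBpw hPBle]
      simp only [PySem.Set.empty, List.not_mem_nil, false_or, hcont]
    -- B's value
    have hB : count_subtractorizations_alt n
        = (if ((PB.zip PB.tail).countP (fun pq => pq.2 - pq.1 == 2) : Int) ≠ 0
            then ((PB.zip PB.tail).countP (fun pq => pq.2 - pq.1 == 2) : Int) + 1
            else ((PB.zip PB.tail).countP (fun pq => pq.2 - pq.1 == 2) : Int)) := by
      simp only [count_subtractorizations_alt]
      rw [if_neg (by omega : ¬ n < 2), hPB, pvGapCount]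
    set W := PB.filter (fun p => decide (p + 2 ∈ PB)) with hWdef
    have hzc : (PB.zip PB.tail).countP (fun pq => pq.2 - pq.1 == 2) = W.length :=
      pvZipCount PB hPBpw (fun x hx => by
        have := (hmemPB x).mp hx
        exact ⟨this.1, this.2.2⟩)
    have hWmem : ∀ p, p ∈ W ↔ p ∈ PB ∧ p + 2 ∈ PB := by
      intro p
      rw [hWdef, List.mem_filter]
      simp
    have hSmem' : ∀ d, d ∈ S ↔ ((d = 2 ∧ W ≠ []) ∨ d ∈ W) := by
      intro d
      rw [hSmem d]
      constructor
      · rintro ⟨p1, hp1, p2, hp2, hle, rfl, hin⟩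
        have h1 := (hmemPB p1).mp hp1
        have h2' := (hmemPB p2).mp hp2
        have hdP := (hmemPA _).mp hin
        by_cases hd2 : p2 - p1 = 2
        · left
          refine ⟨hd2, List.ne_nil_of_mem ((hWmem p1).mpr ⟨hp1, ?_⟩)⟩
          rw [show p1 + 2 = p2 by omega]
          exact hp2
        · right
          have hp1e : p1 = 2 :=
            pvOddDiff p1 p2 (p2 - p1) h1.1 h2'.1 rfl hdP.2.2 hdP.1 hd2 h1.2.2 h2'.2.2
          refine (hWmem _).mpr ⟨(hmemPB _).mpr ⟨hdP.1, by omega, hdP.2.2⟩, ?_⟩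
          rw [show p2 - p1 + 2 = p2 by omega]
          exact hp2
      · rintro (⟨rfl, hWne⟩ | hdW)
        · obtain ⟨w, hw⟩ := List.exists_mem_of_ne_nil W hWne
          have hww := (hWmem w).mp hw
          refine ⟨w, hww.1, w + 2, hww.2, by omega, by ring, ?_⟩
          rw [show w + 2 - w = (2:Int) by ring]
          exact (hmemPA 2).mpr ⟨by omega, by nlinarith, by decide⟩
        · have hdw := (hWmem d).mp hdW
          have hd := (hmemPB d).mp hdw.1
          have h2PB : (2:Int) ∈ PB := (hmemPB 2).mpr ⟨le_refl _, by omega, by decide⟩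
          refine ⟨2, h2PB, d + 2, hdw.2, by omega, by ring, ?_⟩
          rw [show d + 2 - 2 = d by ring]
          exact (hmemPA d).mpr ⟨hd.1, by omega, hd.2.2⟩
    have hSnd : S.Nodup := pvOuterA_nodup _ n _ PySem.Set.empty List.nodup_nil
    have hWnd : W.Nodup := hPBnd.filter _
    by_cases hW : W = []
    · have hSnil : S = [] := by
        rw [List.eq_nil_iff_forall_not_mem]
        intro d hd
        rcases (hSmem' d).mp hd with ⟨-, h⟩ | h
        · exact h hW
        · rw [hW] at h
          exact List.not_mem_nil h
      rw [hA, hB, hzc, hW]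
      show ((S.length : Nat) : Int) = _
      simp [hSnil]
    · have h2W : (2:Int) ∉ W := by
        intro h
        have hx := (hWmem 2).mp h
        have h4 := (hmemPB ((2:Int)+2)).mp hx.2
        exact absurd h4.2.2 (by decide)
      have hS2W : ∀ d, d ∈ S ↔ d ∈ 2 :: W := by
        intro d
        rw [hSmem', List.mem_cons]
        constructor
        · rintro (⟨rfl, -⟩ | h)
          · exact Or.inl rfl
          · exact Or.inr h
        · rintro (rfl | h)
          · exact Or.inl ⟨rfl, hW⟩
          · exact Or.inr h
      have hnd2 : ((2:Int) :: W).Nodup := List.nodup_cons.mpr ⟨h2W, hWnd⟩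
      have hlen := ((List.perm_ext_iff_of_nodup hSnd hnd2).mpr hS2W).length_eq
      rw [hA, hB, hzc]
      have hWpos : W.length ≠ 0 := fun h => hW (List.eq_nil_of_length_eq_zero h)
      rw [if_pos (by exact_mod_cast hWpos : ((W.length : Int) ≠ 0))]
      show ((S.length : Nat) : Int) = (W.length : Int) + 1
      rw [hlen]
      push_cast [List.length_cons]
      ring

-- ===== VERDICT (by name: the statement is the Claim_ definition above) =====
theorem count_subtractorizations_spec : Claim_equal_count_subtractorizations := by
  intro n _ _
  exact pvMain n
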